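-- pv_equiv track=rewrite | github.com/welew204/Advent_of_Code_2023 | nathan/day1.py | number_from_outer_digits
-- ===== SOURCE A (Python) =====
-- numbers_spelled_set = [
--     "one",
--     "two",
--     "three",
--     "four",
--     "five",
--     "six",
--     "seven",
--     "eight",
--     "nine",
-- ]
--
-- def number_from_outer_digits(input_str: str):
--     left_digit = None
--     right_digit = None
--
--     for i, char in enumerate(input_str):
--         if char.isdigit():
--             left_digit = char
--         else:
--             for idx, n in enumerate(numbers_spelled_set):
--                 if input_str[i:].startswith(n):
--                     left_digit = str(idx + 1)
--
--         if left_digit is not None: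
--             break
--
--     for i in range(len(input_str) - 1, -1, -1):
--         if input_str[i].isdigit():
--             right_digit = input_str[i]
--         else:
--             for idx, n in enumerate(numbers_spelled_set):
--                 start = i - len(n) + 1
--                 if input_str[start : i + 1] == n:
--                     right_digit = str(idx + 1)
--                     break
--         if right_digit is not None:
--             break
--
--     return int(left_digit + right_digit)
-- ===== SOURCE B (Python) =====
-- numbers_spelled_set = [
--     "one",
--     "two",
--     "three",
--     "four",
--     "five",
--     "six",
--     "seven",
--     "eight",
--     "nine",
-- ]
--
-- def number_from_outer_digits(input_str: str):
--     digits = []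
--     for i, char in enumerate(input_str):
--         if char.isdigit():
--             digits.append(char)
--         else:
--             for idx, n in enumerate(numbers_spelled_set):
--                 if input_str.startswith(n, i):
--                     digits.append(str(idx + 1))
--                     break
--     left = digits[0] if digits else None
--     right = digits[-1] if digits else None
--     return int(left + right)
-- ===== Notes on version B (the rewrite author's own statement) =====
-- stated objective: simpler
-- what changed: A scans twice from the two boundaries (forward for the first digit, and backward with end-anchored slice matching for the last); B makes one forward pass collecting every digit/spelled-digit match into a list and returns int(first + last).
import Mathlib
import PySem

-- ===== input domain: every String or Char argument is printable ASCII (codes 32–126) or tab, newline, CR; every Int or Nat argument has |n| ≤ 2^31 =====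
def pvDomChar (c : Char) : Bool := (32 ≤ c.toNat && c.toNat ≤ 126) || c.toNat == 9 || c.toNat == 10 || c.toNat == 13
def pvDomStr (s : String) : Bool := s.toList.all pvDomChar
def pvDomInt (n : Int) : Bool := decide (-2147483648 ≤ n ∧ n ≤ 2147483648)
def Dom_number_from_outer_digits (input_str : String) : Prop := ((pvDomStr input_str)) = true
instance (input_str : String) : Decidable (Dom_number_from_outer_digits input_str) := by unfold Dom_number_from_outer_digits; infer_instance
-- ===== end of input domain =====

-- B replaces A's two boundary scans (forward for the first digit, end-anchored backward for the last)
-- by ONE forward pass collecting every digit/spelled-digit match and taking the first and last element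
-- (objective: simpler decomposition). Where no digit occurs both Pythons raise TypeError (None + None);
-- those inputs are excluded by Pre_.

-- ===== PORT A =====
def pvWords : List String :=
  ["one", "two", "three", "four", "five", "six", "seven", "eight", "nine"]

-- forward loop of A: per position, inner for-loop WITHOUT break = last matching word wins (foldl)
def pvALeft : List Char → Option String
  | [] => none
  | c :: rest =>
    let ld : Option String :=
      if PySem.Chars.isdigit c then some (String.ofList [c])
      else
        (PySem.List.enumerate pvWords 0).foldl
          (fun acc p =>
            if PySem.Chars.startswith (c :: rest) p.2.toList then
              some (PySem.Int.toStr (p.1 + 1))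
            else acc)
          none
    match ld with
    | some s => some s
    | none => pvALeft rest

-- inner loop of A's backward scan: first word n with input_str[i-len(n)+1 : i+1] == n (break)
def pvAWordEnd (l : List Char) (i : Nat) : List (Int × String) → Option String
  | [] => none
  | (idx, n) :: rest =>
    if PySem.List.slice l (some ((i : Int) - (n.length : Int) + 1)) (some ((i : Int) + 1)) = n.toList
    then some (PySem.Int.toStr (idx + 1))
    else pvAWordEnd l i rest

-- body of one backward iteration at index i (i < l.length in every Python call, so the none arm is unreachable)
def pvAEnd (l : List Char) (i : Nat) : Option String :=
  match l[i]? with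
  | none => none
  | some c =>
    if PySem.Chars.isdigit c then some (String.ofList [c])
    else pvAWordEnd l i (PySem.List.enumerate pvWords 0)

-- backward loop: for i in range(len-1, -1, -1), stop at the first hit
def pvARight (l : List Char) : Nat → Option String
  | 0 => none
  | k + 1 =>
    match pvAEnd l k with
    | some s => some s
    | none => pvARight l k

def number_from_outer_digits (input_str : String) : Int :=
  let l := input_str.toList
  match pvALeft l, pvARight l l.length with
  | some a, some b => (PySem.Int.ofStr? (a ++ b)).getD 0  -- int(left+right); always a two-digit numeral here, so getD is exact
  | _, _ => 0  -- Python raises TypeError (None + None); excluded by Pre_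

-- ===== PORT B =====
-- B's own copy of the module constant numbers_spelled_set
def pvWordsB : List String :=
  ["one", "two", "three", "four", "five", "six", "seven", "eight", "nine"]

-- inner loop of B: first word matching at the current position (break)
def pvBWord (t : List Char) : List (Int × String) → Option String
  | [] => none
  | (idx, n) :: rest =>
    if PySem.Chars.startswith t n.toList then some (PySem.Int.toStr (idx + 1))
    else pvBWord t rest

-- one position of B's single pass: input_str.startswith(n, i) is startswith on the suffix (exact)
def pvBStep : List Char → Option String
  | [] => none
  | c :: rest =>
    if PySem.Chars.isdigit c then some (String.ofList [c])
    else pvBWord (c :: rest) (PySem.List.enumerate pvWordsB 0)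

-- B's single forward pass collecting all matched digit values
def pvBCollect : List Char → List String
  | [] => []
  | c :: rest =>
    match pvBStep (c :: rest) with
    | some v => v :: pvBCollect rest
    | none => pvBCollect rest

def number_from_outer_digits_alt (input_str : String) : Int :=
  let digits := pvBCollect input_str.toList
  match digits.head? with            -- left = digits[0] if digits else None
  | none => 0                        -- left is None: Python raises TypeError; excluded by Pre_
  | some a =>
    match digits.getLast? with       -- right = digits[-1] if digits else None
    | none => 0
    | some b => (PySem.Int.ofStr? (a ++ b)).getD 0  -- int(left + right)

-- ===== PRECONDITION & SPEC =====
-- Pre_ excludes exactly the strings containing no digit character and no spelled digit: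
-- there BOTH Pythons raise TypeError (None + None).
def Pre_number_from_outer_digits (input_str : String) : Prop :=
  (input_str.toList.any PySem.Chars.isdigit
    || ["one", "two", "three", "four", "five", "six", "seven", "eight", "nine"].any
        (fun w => PySem.Str.isIn w input_str)) = true
instance (input_str : String) : Decidable (Pre_number_from_outer_digits input_str) := by
  unfold Pre_number_from_outer_digits; infer_instance

def pvWitness_number_from_outer_digits : String := "two1nine"

def Spec_number_from_outer_digits (input_str : String) (out : Int) : Prop := out = number_from_outer_digits_alt input_str
instance (input_str : String) (out : Int) : Decidable (Spec_number_from_outer_digits input_str out) := by unfold Spec_number_from_outer_digits; infer_instance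

-- ===== CLAIM (what is proved, stated in full; the proofs are below) =====
def Claim_equal_number_from_outer_digits : Prop := ∀ (input_str : String), Dom_number_from_outer_digits input_str → Pre_number_from_outer_digits input_str → Spec_number_from_outer_digits input_str (number_from_outer_digits input_str)

-- ===== LEMMAS AND PROOFS =====

theorem pvWordsB_eq : pvWordsB = pvWords := rfl

-- (proof-level) first word of the enumeration that is a prefix of t, with its index
def pvWordAt (t : List Char) : List (Int × String) → Option (Int × String)
  | [] => none
  | (idx, n) :: rest =>
    if n.toList <+: t then some (idx, n) else pvWordAt t rest

-- (proof-level) length and value of the match STARTING at position i, if any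
def pvMAt (l : List Char) (i : Nat) : Option (Nat × String) :=
  match l[i]? with
  | none => none
  | some c =>
    if PySem.Chars.isdigit c then some (1, String.ofList [c])
    else
      match pvWordAt (l.drop i) (PySem.List.enumerate pvWords 0) with
      | some (idx, n) => some (n.length, PySem.Int.toStr (idx + 1))
      | none => none

-- no word of pvWords is an infix of another
set_option maxRecDepth 100000 in
theorem pvWords_no_infix : ∀ w1 ∈ pvWords, ∀ w2 ∈ pvWords,
    w2.toList <:+: w1.toList → w2 = w1 := by decide

-- no word contains a digit character (Bool form, kernel-evaluated)
theorem pvWords_no_digit_bool :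
    (pvWords.all fun w => w.toList.all fun c => !PySem.Chars.isdigit c) = true := by rfl

theorem pvWords_no_digit : ∀ w ∈ pvWords, ∀ c ∈ w.toList, PySem.Chars.isdigit c = false := by
  have h := pvWords_no_digit_bool
  simp only [List.all_eq_true, Bool.not_eq_true'] at h
  exact h

theorem pvEnum_lit : PySem.List.enumerate pvWords 0 =
    [(0, "one"), (1, "two"), (2, "three"), (3, "four"), (4, "five"),
     (5, "six"), (6, "seven"), (7, "eight"), (8, "nine")] := by rfl

-- pairs of the enumeration with equal words are equal
set_option maxRecDepth 100000 in
theorem pvEnum_inj : ∀ p ∈ PySem.List.enumerate pvWords 0, ∀ q ∈ PySem.List.enumerate pvWords 0,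
    p.2 = q.2 → p = q := by rw [pvEnum_lit]; decide

set_option maxRecDepth 100000 in
theorem pvEnum_words : ∀ p ∈ PySem.List.enumerate pvWords 0, p.2 ∈ pvWords := by
  rw [pvEnum_lit]; decide

-- at most one word of the enumeration is a prefix of t
theorem pvPrefix_unique (t : List Char) : ∀ p ∈ PySem.List.enumerate pvWords 0, ∀ q ∈ PySem.List.enumerate pvWords 0,
    p.2.toList <+: t → q.2.toList <+: t → p = q := by
  intro p hp q hq hpt hqt
  rcases List.prefix_or_prefix_of_prefix hpt hqt with h | h
  · exact pvEnum_inj p hp q hq (pvWords_no_infix q.2 (pvEnum_words q hq) p.2 (pvEnum_words p hp) h.isInfix)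
  · exact pvEnum_inj p hp q hq (pvWords_no_infix p.2 (pvEnum_words p hp) q.2 (pvEnum_words q hq) h.isInfix).symm

-- helper: compute the Bool of startswith from the Prop
theorem sw_true {t w : List Char} (h : w <+: t) : PySem.Chars.startswith t w = true :=
  (PySem.Chars.startswith_iff t w).mpr h

theorem sw_false {t w : List Char} (h : ¬ w <+: t) : PySem.Chars.startswith t w = false := by
  cases h2 : PySem.Chars.startswith t w
  · rfl
  · exact absurd ((PySem.Chars.startswith_iff t w).mp h2) h

-- B's first-match word scan, in terms of pvWordAt
theorem bword_eq (t : List Char) : ∀ es : List (Int × String),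
    pvBWord t es = (pvWordAt t es).map (fun p => PySem.Int.toStr (p.1 + 1))
  | [] => rfl
  | (idx, n) :: rest => by
    by_cases hp : n.toList <+: t
    · simp only [pvBWord, pvWordAt, sw_true hp, if_pos hp, if_true, Option.map_some]
    · simp only [pvBWord, pvWordAt, sw_false hp, if_neg hp, Bool.false_eq_true, if_false]
      exact bword_eq t rest

-- invariant: once the accumulator holds the unique answer, A's breakless fold keeps it
theorem foldl_keep (t : List Char) (v : String) : ∀ es : List (Int × String),
    (∀ q ∈ es, q.2.toList <+: t → PySem.Int.toStr (q.1 + 1) = v) →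
    es.foldl (fun acc p => if PySem.Chars.startswith t p.2.toList then
        some (PySem.Int.toStr (p.1 + 1)) else acc) (some v) = some v
  | [], _ => rfl
  | (idx, n) :: rest, h => by
    by_cases hp : n.toList <+: t
    · simp only [List.foldl_cons, sw_true hp, if_true,
        h (idx, n) List.mem_cons_self hp]
      exact foldl_keep t v rest (fun q hq => h q (List.mem_cons_of_mem _ hq))
    · simp only [List.foldl_cons, sw_false hp, Bool.false_eq_true, if_false]
      exact foldl_keep t v rest (fun q hq => h q (List.mem_cons_of_mem _ hq))

-- A's breakless fold = B's first-match scan, given uniqueness of the match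
theorem fold_eq_bword (t : List Char) : ∀ es : List (Int × String),
    (∀ p ∈ es, ∀ q ∈ es, p.2.toList <+: t → q.2.toList <+: t → p = q) →
    es.foldl (fun acc p => if PySem.Chars.startswith t p.2.toList then
        some (PySem.Int.toStr (p.1 + 1)) else acc) none = pvBWord t es
  | [], _ => rfl
  | (idx, n) :: rest, h => by
    by_cases hp : n.toList <+: t
    · simp only [List.foldl_cons, pvBWord, sw_true hp, if_true]
      exact foldl_keep t _ rest (fun q hq hqp => by
        rw [h q (List.mem_cons_of_mem _ hq) (idx, n) List.mem_cons_self hqp hp])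
    · simp only [List.foldl_cons, pvBWord, sw_false hp, Bool.false_eq_true, if_false]
      exact fold_eq_bword t rest (fun p hp' q hq' => h p (List.mem_cons_of_mem _ hp')
        q (List.mem_cons_of_mem _ hq'))

theorem astep_eq (c : Char) (rest : List Char) : pvALeft (c :: rest) =
    (match pvBStep (c :: rest) with
     | some s => some s
     | none => pvALeft rest) := by
  show (match (if PySem.Chars.isdigit c then some (String.ofList [c])
      else (PySem.List.enumerate pvWords 0).foldl _ none : Option String) with
    | some s => some s | none => pvALeft rest) = _
  cases hd : PySem.Chars.isdigit c with
  | true => simp only [pvBStep, hd, if_true]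
  | false =>
    simp only [pvBStep, pvWordsB_eq, hd, if_false, Bool.false_eq_true]
    rw [fold_eq_bword (c :: rest) _ (fun p hp q hq hpt hqt =>
      pvPrefix_unique (c :: rest) p hp q hq hpt hqt)]

theorem step_eq (c : Char) (rest : List Char) :
    pvBStep (c :: rest) = (pvMAt (c :: rest) 0).map Prod.snd := by
  show _ = ((match (c :: rest)[0]? with
    | none => none
    | some c' => if PySem.Chars.isdigit c' then some (1, String.ofList [c'])
        else match pvWordAt ((c :: rest).drop 0) (PySem.List.enumerate pvWords 0) with
          | some (idx, n) => some (n.length, PySem.Int.toStr (idx + 1))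
          | none => none : Option (Nat × String)).map Prod.snd)
  simp only [List.getElem?_cons_zero, List.drop_zero, pvBStep, pvWordsB_eq]
  cases hd : PySem.Chars.isdigit c with
  | true => rfl
  | false =>
    simp only [Bool.false_eq_true, if_false]
    rw [bword_eq]
    cases pvWordAt (c :: rest) (PySem.List.enumerate pvWords 0) with
    | none => rfl
    | some p => rfl

theorem mAt_shift (c : Char) (rest : List Char) (i : Nat) :
    pvMAt (c :: rest) (i + 1) = pvMAt rest i := by
  unfold pvMAt
  rw [List.getElem?_cons_succ, List.drop_succ_cons]

theorem collect_eq : ∀ l : List Char,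
    pvBCollect l = (List.range l.length).filterMap (fun i => (pvMAt l i).map Prod.snd)
  | [] => rfl
  | c :: rest => by
    rw [show (c :: rest).length = rest.length + 1 from rfl, List.range_succ_eq_map,
      List.filterMap_cons, List.filterMap_map]
    have h2 : ∀ i, ((fun i => (pvMAt (c :: rest) i).map Prod.snd) ∘ (fun i => i + 1)) i
        = (fun i => (pvMAt rest i).map Prod.snd) i := by
      intro i; simp only [Function.comp_apply, mAt_shift]
    rw [funext h2, ← collect_eq rest, ← step_eq]
    cases hs : pvBStep (c :: rest) with
    | none => simp only [pvBCollect, hs]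
    | some v => simp only [pvBCollect, hs]

theorem left_eq : ∀ l : List Char, pvALeft l = (pvBCollect l).head?
  | [] => rfl
  | c :: rest => by
    rw [astep_eq]
    show _ = (match pvBStep (c :: rest) with
      | some v => v :: pvBCollect rest
      | none => pvBCollect rest).head?
    cases pvBStep (c :: rest) with
    | some v => rfl
    | none => exact left_eq rest

-- ---- characterising word matches ----

-- the end-anchored match condition of A's backward inner loop, as a predicate on enum pairs
def pvEM (l : List Char) (e : Nat) (p : Int × String) : Prop :=
  p.2.length ≤ e + 1 ∧ p.2.toList <+: l.drop (e + 1 - p.2.length)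

theorem pvWords_len : ∀ w ∈ pvWords, 1 ≤ w.length := by decide

-- a character of a word match, read back from the string
theorem prefix_getElem? {w t : List Char} (h : w <+: t) {j : Nat} (hj : j < w.length) :
    t[j]? = w[j]? := by
  rw [List.prefix_iff_eq_take] at h
  conv => rhs; rw [h]
  rw [List.getElem?_take_of_lt hj]

theorem prefix_drop_getElem? {w : List Char} {l : List Char} {s j : Nat}
    (h : w <+: l.drop s) (hj : j < w.length) : l[s + j]? = w[j]? := by
  rw [← List.getElem?_drop, prefix_getElem? h hj]

-- CORE: a word match contained in the span of another word match is the same match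
theorem word_contain {l : List Char} {n1 n2 : String} {s1 s2 : Nat}
    (h1 : n1 ∈ pvWords) (h2 : n2 ∈ pvWords)
    (p1 : n1.toList <+: l.drop s1) (p2 : n2.toList <+: l.drop s2)
    (hle : s1 ≤ s2) (hc : s2 + n2.length ≤ s1 + n1.length) : n1 = n2 ∧ s1 = s2 := by
  have e1 : n1.toList.length = n1.length := by simp
  have e2 : n2.toList.length = n2.length := by simp
  have hinf : n2.toList <:+: n1.toList := by
    refine ⟨n1.toList.take (s2 - s1), (n1.toList.drop (s2 - s1)).drop n2.length, ?_⟩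
    have hsub : n2.toList = (n1.toList.drop (s2 - s1)).take n2.toList.length := by
      apply List.ext_getElem?
      intro j
      by_cases hj : j < n2.toList.length
      · rw [List.getElem?_take_of_lt hj, List.getElem?_drop]
        have hx : l[s2 + j]? = n2.toList[j]? := prefix_drop_getElem? p2 hj
        have hy : l[s1 + (s2 - s1 + j)]? = n1.toList[s2 - s1 + j]? :=
          prefix_drop_getElem? p1 (by omega)
        rw [show s1 + (s2 - s1 + j) = s2 + j by omega] at hy
        rw [← hy, hx]
      · rw [List.getElem?_eq_none (by omega), List.getElem?_eq_none]
        simp only [List.length_take, List.length_drop]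
        omega
    calc n1.toList.take (s2 - s1) ++ n2.toList ++ (n1.toList.drop (s2 - s1)).drop n2.length
        = n1.toList.take (s2 - s1) ++ ((n1.toList.drop (s2 - s1)).take n2.toList.length
            ++ (n1.toList.drop (s2 - s1)).drop n2.length) := by rw [← hsub]; simp
      _ = n1.toList := by rw [e2, List.take_append_drop, List.take_append_drop]
  have heq : n2 = n1 := pvWords_no_infix n1 h1 n2 h2 hinf
  refine ⟨heq.symm, ?_⟩
  have : n1.length = n2.length := by rw [heq]
  omega

-- end-anchored matches at the same end position are unique
theorem em_unique {l : List Char} {e : Nat} :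
    ∀ p ∈ PySem.List.enumerate pvWords 0, ∀ q ∈ PySem.List.enumerate pvWords 0,
    pvEM l e p → pvEM l e q → p = q := by
  intro p hp q hq ⟨hp1, hp2⟩ ⟨hq1, hq2⟩
  have hwp := pvEnum_words p hp
  have hwq := pvEnum_words q hq
  have lp := pvWords_len _ hwp
  have lq := pvWords_len _ hwq
  rcases le_total (e + 1 - p.2.length) (e + 1 - q.2.length) with h | h
  · have := word_contain hwp hwq hp2 hq2 h (by omega)
    exact pvEnum_inj p hp q hq this.1
  · have := word_contain hwq hwp hq2 hp2 h (by omega)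
    exact pvEnum_inj p hp q hq this.1.symm

-- the slice condition of A's backward inner loop ⟺ pvEM
theorem endcond_iff (l : List Char) (i : Nat) (n : String) :
    (PySem.List.slice l (some ((i : Int) - (n.length : Int) + 1)) (some ((i : Int) + 1))
      = n.toList) ↔ (n.length ≤ i + 1 ∧ n.toList <+: l.drop (i + 1 - n.length)) := by
  have e0 : n.toList.length = n.length := by simp
  by_cases hle : n.length ≤ i + 1
  · have hc1 : ((i : Int) - (n.length : Int) + 1) = ((i + 1 - n.length : Nat) : Int) := by
      omega
    have hc2 : ((i : Int) + 1) = ((i + 1 : Nat) : Int) := by omega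
    rw [hc1, hc2, PySem.List.slice_natCast]
    rw [show i + 1 - (i + 1 - n.length) = n.length by omega]
    constructor
    · intro h
      refine ⟨hle, ?_⟩
      rw [List.prefix_iff_eq_take, e0]
      exact h.symm
    · intro ⟨_, h⟩
      rw [List.prefix_iff_eq_take, e0] at h
      exact h.symm
  · constructor
    · intro h
      exfalso
      have := congrArg List.length h
      rw [PySem.List.length_slice, e0] at this
      have h1 : PySem.List.clampIdx l.length ((i : Int) + 1) ≤ i + 1 := by
        rw [show ((i : Int) + 1) = ((i + 1 : Nat) : Int) by omega,
          PySem.List.clampIdx_natCast]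
        omega
      omega
    · intro ⟨h, _⟩; omega

-- first-match lemmas for A's backward inner loop
theorem awe_none (l : List Char) (e : Nat) : ∀ es : List (Int × String),
    (∀ p ∈ es, ¬ pvEM l e p) → pvAWordEnd l e es = none
  | [], _ => rfl
  | (idx, n) :: rest, h => by
    have hc : ¬ (PySem.List.slice l (some ((e : Int) - (n.length : Int) + 1))
        (some ((e : Int) + 1)) = n.toList) := by
      rw [endcond_iff]
      exact h (idx, n) List.mem_cons_self
    simp only [pvAWordEnd, if_neg hc]
    exact awe_none l e rest (fun p hp => h p (List.mem_cons_of_mem _ hp))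

theorem awe_some (l : List Char) (e : Nat) (p : Int × String) : ∀ es : List (Int × String),
    p ∈ es → pvEM l e p → (∀ q ∈ es, pvEM l e q → q = p) →
    pvAWordEnd l e es = some (PySem.Int.toStr (p.1 + 1))
  | [], hm, _, _ => absurd hm (List.not_mem_nil)
  | (idx, n) :: rest, hm, hem, huniq => by
    by_cases hc : pvEM l e (idx, n)
    · have : (idx, n) = p := huniq (idx, n) List.mem_cons_self hc
      simp only [pvAWordEnd, if_pos ((endcond_iff l e n).mpr hc)]
      rw [← this]
    · have hcc : ¬ (PySem.List.slice l (some ((e : Int) - (n.length : Int) + 1))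
          (some ((e : Int) + 1)) = n.toList) := by rw [endcond_iff]; exact hc
      simp only [pvAWordEnd, if_neg hcc]
      have hm' : p ∈ rest := by
        rcases List.mem_cons.mp hm with h | h
        · subst h; exact absurd hem hc
        · exact h
      exact awe_some l e p rest hm' hem (fun q hq => huniq q (List.mem_cons_of_mem _ hq))

theorem awe_inv (l : List Char) (e : Nat) : ∀ es : List (Int × String), ∀ v,
    pvAWordEnd l e es = some v →
    ∃ p ∈ es, pvEM l e p ∧ v = PySem.Int.toStr (p.1 + 1)
  | [], v, h => by simp [pvAWordEnd] at h
  | (idx, n) :: rest, v, h => by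
    by_cases hc : (PySem.List.slice l (some ((e : Int) - (n.length : Int) + 1))
        (some ((e : Int) + 1)) = n.toList)
    · simp only [pvAWordEnd, if_pos hc] at h
      exact ⟨(idx, n), List.mem_cons_self, (endcond_iff l e n).mp hc,
        (Option.some_inj.mp h).symm⟩
    · simp only [pvAWordEnd, if_neg hc] at h
      obtain ⟨p, hp, hem, hv⟩ := awe_inv l e rest v h
      exact ⟨p, List.mem_cons_of_mem _ hp, hem, hv⟩

-- first-match lemmas for the start-anchored scan pvWordAt
theorem wa_none (t : List Char) : ∀ es : List (Int × String),
    (∀ p ∈ es, ¬ p.2.toList <+: t) → pvWordAt t es = none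
  | [], _ => rfl
  | (idx, n) :: rest, h => by
    simp only [pvWordAt, if_neg (h (idx, n) List.mem_cons_self)]
    exact wa_none t rest (fun p hp => h p (List.mem_cons_of_mem _ hp))

theorem wa_some (t : List Char) (p : Int × String) : ∀ es : List (Int × String),
    p ∈ es → p.2.toList <+: t → (∀ q ∈ es, q.2.toList <+: t → q = p) →
    pvWordAt t es = some p
  | [], hm, _, _ => absurd hm (List.not_mem_nil)
  | (idx, n) :: rest, hm, hpre, huniq => by
    by_cases hc : n.toList <+: t
    · have : (idx, n) = p := huniq (idx, n) List.mem_cons_self hc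
      simp only [pvWordAt, if_pos hc, this]
    · simp only [pvWordAt, if_neg hc]
      have hm' : p ∈ rest := by
        rcases List.mem_cons.mp hm with h | h
        · subst h; exact absurd hpre hc
        · exact h
      exact wa_some t p rest hm' hpre (fun q hq => huniq q (List.mem_cons_of_mem _ hq))

theorem wa_inv (t : List Char) : ∀ es : List (Int × String), ∀ p,
    pvWordAt t es = some p → p ∈ es ∧ p.2.toList <+: t
  | [], p, h => by simp [pvWordAt] at h
  | (idx, n) :: rest, p, h => by
    by_cases hc : n.toList <+: t
    · simp only [pvWordAt, if_pos hc, Option.some_inj] at h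
      exact ⟨h ▸ List.mem_cons_self, h ▸ hc⟩
    · simp only [pvWordAt, if_neg hc] at h
      obtain ⟨h1, h2⟩ := wa_inv t rest p h
      exact ⟨List.mem_cons_of_mem _ h1, h2⟩

-- ---- start-match ⇄ end-match correspondence ----

theorem mAt_bounds {l : List Char} {s len : Nat} {v : String}
    (h : pvMAt l s = some (len, v)) : 1 ≤ len ∧ s + len ≤ l.length := by
  cases hg : l[s]? with
  | none => simp only [pvMAt, hg] at h; exact absurd h (by simp)
  | some c =>
    have hs : s < l.length := List.getElem?_eq_some_iff.mp hg |>.1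
    simp only [pvMAt, hg] at h
    by_cases hd : PySem.Chars.isdigit c = true
    · rw [if_pos hd] at h
      have hl : 1 = len := congrArg Prod.fst (Option.some_inj.mp h)
      omega
    · rw [if_neg hd] at h
      cases hw : pvWordAt (l.drop s) (PySem.List.enumerate pvWords 0) with
      | none => rw [hw] at h; exact absurd h (by simp)
      | some p =>
        rw [hw] at h
        obtain ⟨hmem, hpre⟩ := wa_inv _ _ _ hw
        have : (p.2.length, PySem.Int.toStr (p.1 + 1)) = (len, v) := Option.some_inj.mp h
        have hlen : p.2.length = len := congrArg Prod.fst this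
        have h1 := pvWords_len _ (pvEnum_words p hmem)
        have h2 := hpre.length_le
        rw [List.length_drop] at h2
        have e2 : p.2.toList.length = p.2.length := by simp
        omega

-- F2: a start match yields the corresponding end match
theorem start_to_end {l : List Char} {s len : Nat} {v : String}
    (h : pvMAt l s = some (len, v)) : pvAEnd l (s + len - 1) = some v := by
  have ⟨hb1, hb2⟩ := mAt_bounds h
  cases hg : l[s]? with
  | none => simp only [pvMAt, hg] at h; exact absurd h (by simp)
  | some c =>
    simp only [pvMAt, hg] at h
    by_cases hd : PySem.Chars.isdigit c = true
    · rw [if_pos hd] at h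
      have he : (1, String.ofList [c]) = (len, v) := Option.some_inj.mp h
      have hl : len = 1 := (congrArg Prod.fst he).symm
      subst hl
      have hv : v = String.ofList [c] := (congrArg Prod.snd he).symm
      simp only [pvAEnd, show s + 1 - 1 = s by omega, hg, if_pos hd, hv]
    · rw [if_neg hd] at h
      cases hw : pvWordAt (l.drop s) (PySem.List.enumerate pvWords 0) with
      | none => rw [hw] at h; exact absurd h (by simp)
      | some p =>
        rw [hw] at h
        obtain ⟨hmem, hpre⟩ := wa_inv _ _ _ hw
        have he : (p.2.length, PySem.Int.toStr (p.1 + 1)) = (len, v) := Option.some_inj.mp h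
        have hlen : p.2.length = len := congrArg Prod.fst he
        have hv : PySem.Int.toStr (p.1 + 1) = v := congrArg Prod.snd he
        have e2 : p.2.toList.length = p.2.length := by simp
        -- the last char of the word is at position e := s + len - 1 and is not a digit
        have hlast : l[s + (len - 1)]? = p.2.toList[len - 1]? :=
          prefix_drop_getElem? hpre (by omega)
        have hmem2 : p.2.toList[len - 1]'(by omega) ∈ p.2.toList := List.getElem_mem _
        have hnd := pvWords_no_digit p.2 (pvEnum_words p hmem) _ hmem2
        simp only [pvAEnd, show s + len - 1 = s + (len - 1) by omega, hlast,
          List.getElem?_eq_getElem (show len - 1 < p.2.toList.length by omega),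
          hnd, Bool.false_eq_true, if_false]
        rw [← hv]
        apply awe_some
        · exact hmem
        · constructor
          · omega
          · rw [show s + (len - 1) + 1 - p.2.length = s by omega]
            exact hpre
        · intro q hq hqem
          exact em_unique q hq p hmem hqem
            ⟨by omega, by rw [show s + (len - 1) + 1 - p.2.length = s by omega]; exact hpre⟩

-- F3: an end match comes from a start match
theorem end_to_start {l : List Char} {i : Nat} {v : String} (h : pvAEnd l i = some v) :
    ∃ s len, pvMAt l s = some (len, v) ∧ s + len = i + 1 := by
  cases hg : l[i]? with
  | none => simp only [pvAEnd, hg] at h; exact absurd h (by simp)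
  | some c =>
    have hi : i < l.length := List.getElem?_eq_some_iff.mp hg |>.1
    simp only [pvAEnd, hg] at h
    by_cases hd : PySem.Chars.isdigit c = true
    · rw [if_pos hd] at h
      refine ⟨i, 1, ?_, by omega⟩
      simp only [pvMAt, hg, if_pos hd, Option.some_inj.mp h]
    · rw [if_neg hd] at h
      obtain ⟨p, hmem, ⟨hle, hpre⟩, hv⟩ := awe_inv l i _ v h
      have lp := pvWords_len _ (pvEnum_words p hmem)
      have e2 : p.2.toList.length = p.2.length := by simp
      refine ⟨i + 1 - p.2.length, p.2.length, ?_, by omega⟩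
      unfold pvMAt
      have hfirst : l[i + 1 - p.2.length]? = p.2.toList[0]? := by
        have := prefix_drop_getElem? hpre (show 0 < p.2.toList.length by omega)
        rwa [Nat.add_zero] at this
      have hmem0 : p.2.toList[0]'(by omega) ∈ p.2.toList := List.getElem_mem _
      have hnd := pvWords_no_digit p.2 (pvEnum_words p hmem) _ hmem0
      simp only [hfirst, List.getElem?_eq_getElem (show 0 < p.2.toList.length by omega),
        hnd, Bool.false_eq_true, if_false,
        wa_some (l.drop (i + 1 - p.2.length)) p _ hmem hpre
          (fun q hq hqpre => pvPrefix_unique _ q hq p hmem hqpre hpre), hv]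

-- F4: a start match contained in the span of another start match is the same
theorem mAt_contain {l : List Char} {s1 s2 len1 len2 : Nat} {v1 v2 : String}
    (h1 : pvMAt l s1 = some (len1, v1)) (h2 : pvMAt l s2 = some (len2, v2))
    (hle : s1 ≤ s2) (hc : s2 + len2 ≤ s1 + len1) : s1 = s2 := by
  have b1 := mAt_bounds h1
  have b2 := mAt_bounds h2
  cases hg1 : l[s1]? with
  | none => simp only [pvMAt, hg1] at h1; exact absurd h1 (by simp)
  | some c1 =>
  cases hg2 : l[s2]? with
  | none => simp only [pvMAt, hg2] at h2; exact absurd h2 (by simp)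
  | some c2 =>
    simp only [pvMAt, hg1] at h1; simp only [pvMAt, hg2] at h2
    by_cases hd1 : PySem.Chars.isdigit c1 = true
    · -- match 1 is a single digit: len1 = 1 forces s1 = s2
      rw [if_pos hd1] at h1
      have : len1 = 1 := (congrArg Prod.fst (Option.some_inj.mp h1)).symm
      omega
    · rw [if_neg hd1] at h1
      cases hw1 : pvWordAt (l.drop s1) (PySem.List.enumerate pvWords 0) with
      | none => rw [hw1] at h1; exact absurd h1 (by simp)
      | some p1 =>
        rw [hw1] at h1
        obtain ⟨hm1, hp1⟩ := wa_inv _ _ _ hw1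
        have hlen1 : p1.2.length = len1 := congrArg Prod.fst (Option.some_inj.mp h1)
        by_cases hd2 : PySem.Chars.isdigit c2 = true
        · -- match 2 is a digit inside word 1: impossible, words have no digits
          exfalso
          have e1 : p1.2.toList.length = p1.2.length := by simp
          have hj : s2 - s1 < p1.2.toList.length := by omega
          have hx : l[s1 + (s2 - s1)]? = p1.2.toList[s2 - s1]? :=
            prefix_drop_getElem? hp1 (by omega)
          rw [show s1 + (s2 - s1) = s2 by omega, hg2,
            List.getElem?_eq_getElem hj] at hx
          have hmemc : p1.2.toList[s2 - s1]'hj ∈ p1.2.toList := List.getElem_mem _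
          have hnd := pvWords_no_digit p1.2 (pvEnum_words p1 hm1) _ hmemc
          rw [Option.some_inj.mp hx] at hd2
          rw [hnd] at hd2
          exact Bool.false_ne_true hd2
        · rw [if_neg hd2] at h2
          cases hw2 : pvWordAt (l.drop s2) (PySem.List.enumerate pvWords 0) with
          | none => rw [hw2] at h2; exact absurd h2 (by simp)
          | some p2 =>
            rw [hw2] at h2
            obtain ⟨hm2, hp2⟩ := wa_inv _ _ _ hw2
            have hlen2 : p2.2.length = len2 := congrArg Prod.fst (Option.some_inj.mp h2)
            have := word_contain (pvEnum_words p1 hm1) (pvEnum_words p2 hm2) hp1 hp2 hle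
              (by omega)
            exact this.2

-- ---- last-of-range characterisations ----

theorem fl_last (f : Nat → Option String) : ∀ n s v, s < n → f s = some v →
    (∀ j, s < j → j < n → f j = none) → ((List.range n).filterMap f).getLast? = some v
  | 0, s, v, h, _, _ => absurd h (by omega)
  | n + 1, s, v, hs, hf, hnone => by
    rw [List.range_succ, List.filterMap_append]
    by_cases he : s = n
    · subst he
      rw [show (List.filterMap f [s]) = [v] by simp [hf]]
      exact List.getLast?_concat ..
    · have hfn : f n = none := hnone n (by omega) (by omega)
      rw [show (List.filterMap f [n]) = [] by simp [hfn],
        List.append_nil]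
      exact fl_last f n s v (by omega) hf (fun j h1 h2 => hnone j h1 (by omega))

theorem ar_none (l : List Char) : ∀ k, (∀ j, j < k → pvAEnd l j = none) → pvARight l k = none
  | 0, _ => rfl
  | k + 1, h => by
    unfold pvARight
    rw [h k (by omega)]
    exact ar_none l k (fun j hj => h j (by omega))

theorem ar_some (l : List Char) : ∀ k e v, e < k → pvAEnd l e = some v →
    (∀ j, e < j → j < k → pvAEnd l j = none) → pvARight l k = some v
  | 0, e, v, h, _, _ => absurd h (by omega)
  | k + 1, e, v, he, hf, hnone => by
    unfold pvARight
    by_cases heq : e = k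
    · subst heq; rw [hf]
    · rw [hnone k (by omega) (by omega)]
      exact ar_some l k e v (by omega) hf (fun j h1 h2 => hnone j h1 (by omega))

-- ---- the backward scan finds the last collected digit ----

theorem right_eq (l : List Char) : pvARight l l.length = (pvBCollect l).getLast? := by
  rw [collect_eq l]
  by_cases hex : ∃ s, s < l.length ∧ (pvMAt l s).isSome = true
  · obtain ⟨s, hs, hsome⟩ := hex
    set P : Nat → Prop := fun i => (pvMAt l i).isSome = true with hP
    have hdec : DecidablePred P := fun i => by rw [hP]; infer_instance
    set s0 := Nat.findGreatest P (l.length - 1) with hs0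
    have hPs0 : P s0 := Nat.findGreatest_spec (m := s) (by omega) hsome
    have hmax : ∀ j, s0 < j → j < l.length → pvMAt l j = none := by
      intro j h1 h2
      have := Nat.findGreatest_is_greatest (n := l.length - 1) (P := P) h1 (by omega)
      rw [hP] at this
      simpa using this
    obtain ⟨⟨len0, v0⟩, hm0⟩ := Option.isSome_iff_exists.mp hPs0
    have ⟨hb1, hb2⟩ := mAt_bounds hm0
    have hs0lt : s0 < l.length := by omega
    -- B side: the last collected value is v0
    have hB : ((List.range l.length).filterMap
        (fun i => (pvMAt l i).map Prod.snd)).getLast? = some v0 := by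
      apply fl_last _ _ s0 v0 hs0lt (by rw [hm0]; rfl)
      intro j h1 h2
      rw [hmax j h1 h2]; rfl
    -- A side: the backward scan stops at e0 := s0 + len0 - 1 with value v0
    have hA : pvARight l l.length = some v0 := by
      apply ar_some l l.length (s0 + len0 - 1) v0 (by omega) (start_to_end hm0)
      intro j h1 h2
      cases hj : pvAEnd l j with
      | none => rfl
      | some w =>
        exfalso
        obtain ⟨s', len', hm', hsum⟩ := end_to_start hj
        by_cases hcmp : s' ≤ s0
        · have heq := mAt_contain hm' hm0 hcmp (by omega)
          rw [heq, hm0] at hm'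
          have : len' = len0 := (congrArg Prod.fst (Option.some_inj.mp hm')).symm
          omega
        · have hb' := mAt_bounds hm'
          have := hmax s' (by omega) (by omega)
          rw [this] at hm'
          exact absurd hm' (by simp)
    rw [hA, hB]
  · have hnone : ∀ s, s < l.length → pvMAt l s = none := by
      intro s hs
      cases hm : pvMAt l s with
      | none => rfl
      | some p => exact absurd ⟨s, hs, by rw [hm]; rfl⟩ hex
    have hB : (List.range l.length).filterMap (fun i => (pvMAt l i).map Prod.snd) = [] := by
      rw [List.filterMap_eq_nil_iff]
      intro a ha
      rw [hnone a (List.mem_range.mp ha)]; rfl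
    rw [hB]
    have hA : pvARight l l.length = none := by
      apply ar_none
      intro j hj
      cases hj2 : pvAEnd l j with
      | none => rfl
      | some w =>
        exfalso
        obtain ⟨s', len', hm', hsum⟩ := end_to_start hj2
        have hb' := mAt_bounds hm'
        have := hnone s' (by omega)
        rw [this] at hm'
        exact absurd hm' (by simp)
    rw [hA]
    rfl

-- ===== VERDICT (by name: the statement is the Claim_ definition above) =====
theorem number_from_outer_digits_spec : Claim_equal_number_from_outer_digits := by
  intro s _ _
  unfold Spec_number_from_outer_digits number_from_outer_digits number_from_outer_digits_alt
  simp only [left_eq, right_eq]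
  cases (pvBCollect s.toList).head? <;> cases (pvBCollect s.toList).getLast? <;> rfl
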